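-- pv_equiv track=rewrite | github.com/um-computacion-tm/ajedrez-2024-CandelaGonzalezP | chess/knight.py | is_knight_move
-- ===== SOURCE A (Python) =====
-- def is_knight_move(from_pos, to_pos):
--
--     """
--     Verifica si el movimiento del caballo es válido.
--
--     Args:
--         from_pos (tuple): Posición inicial del caballo en el formato (fila, columna).
--         to_pos (tuple): Posición final a la que se desea mover el caballo en el formato (fila, columna).
--
--     Returns:
--         bool: True si el movimiento es válido (en forma de "L"), False en caso contrario.
--     """
--
--     valid_moves = [(2, 1), (2, -1), (-2, 1), (-2, -1),
--                 (1, 2), (1, -2), (-1, 2), (-1, -2)]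
--
--     from_row, from_col = from_pos
--     to_row, to_col = to_pos
--     for delta_row, delta_col in valid_moves:
--         if (to_row == from_row + delta_row) and (to_col == from_col + delta_col):
--             return True
--
--     return False
-- ===== SOURCE B (Python) =====
-- def is_knight_move(from_pos, to_pos):
--     from_row, from_col = from_pos
--     to_row, to_col = to_pos
--     dr = abs(to_row - from_row)
--     dc = abs(to_col - from_col)
--     return (dr, dc) in {(1, 2), (2, 1)}
-- ===== Notes on version B (the rewrite author's own statement) =====
-- stated objective: simpler
-- what changed: Replaced the loop over the 8 explicit knight offsets by a closed-form absolute-displacement check (dr,dc) in {(1,2),(2,1)}.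
import Mathlib
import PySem

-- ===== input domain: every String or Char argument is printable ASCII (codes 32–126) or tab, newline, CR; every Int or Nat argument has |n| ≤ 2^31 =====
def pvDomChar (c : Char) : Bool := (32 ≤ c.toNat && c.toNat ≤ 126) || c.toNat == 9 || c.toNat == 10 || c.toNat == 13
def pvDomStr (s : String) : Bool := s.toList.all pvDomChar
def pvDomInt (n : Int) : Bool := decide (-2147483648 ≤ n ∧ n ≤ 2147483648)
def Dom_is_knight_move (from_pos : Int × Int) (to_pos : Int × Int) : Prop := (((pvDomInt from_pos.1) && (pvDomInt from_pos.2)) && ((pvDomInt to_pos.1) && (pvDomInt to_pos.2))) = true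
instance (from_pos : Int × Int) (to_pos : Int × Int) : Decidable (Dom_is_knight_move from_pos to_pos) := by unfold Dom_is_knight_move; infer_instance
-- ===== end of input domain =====

-- B replaces A's loop over the 8 explicit knight offsets by a closed-form absolute-displacement membership check; objective: simpler.


-- ===== PORT A =====
-- loop over the 8 explicit offsets, transliterated as a fold with early-true accumulator
def is_knight_move (from_pos : Int × Int) (to_pos : Int × Int) : Bool :=
  let valid_moves : List (Int × Int) :=
    [(2, 1), (2, -1), (-2, 1), (-2, -1), (1, 2), (1, -2), (-1, 2), (-1, -2)]
  let from_row := from_pos.1; let from_col := from_pos.2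
  let to_row := to_pos.1; let to_col := to_pos.2
  valid_moves.foldl (fun acc d =>
    acc || (to_row == from_row + d.1 && to_col == from_col + d.2)) false

-- ===== PORT B =====
-- closed-form |dr|,|dc| membership check
def is_knight_move_alt (from_pos : Int × Int) (to_pos : Int × Int) : Bool :=
  let dr := (to_pos.1 - from_pos.1).natAbs
  let dc := (to_pos.2 - from_pos.2).natAbs
  decide ((dr, dc) ∈ ([(1, 2), (2, 1)] : List (Nat × Nat)))

-- ===== PRECONDITION & SPEC =====
def Spec_is_knight_move (from_pos : Int × Int) (to_pos : Int × Int) (out : Bool) : Prop := out = is_knight_move_alt from_pos to_pos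
instance (from_pos : Int × Int) (to_pos : Int × Int) (out : Bool) : Decidable (Spec_is_knight_move from_pos to_pos out) := by unfold Spec_is_knight_move; infer_instance

-- ===== CLAIM (what is proved, stated in full; the proofs are below) =====
def Claim_equal_is_knight_move : Prop := ∀ (from_pos : Int × Int) (to_pos : Int × Int), Dom_is_knight_move from_pos to_pos → Spec_is_knight_move from_pos to_pos (is_knight_move from_pos to_pos)

-- ===== LEMMAS AND PROOFS =====

-- ===== VERDICT (by name: the statement is the Claim_ definition above) =====
theorem is_knight_move_spec : Claim_equal_is_knight_move := by
  intro fp tp _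
  unfold Spec_is_knight_move is_knight_move is_knight_move_alt
  rcases fp with ⟨fr, fc⟩; rcases tp with ⟨tr, tc⟩
  rw [Bool.eq_iff_iff]
  simp [List.foldl]
  omega
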